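-- pv_equiv track=rewrite | github.com/pypi-data/pypi-mirror-95 | packages/jk-cmdoutputparsinghelper/jk_cmdoutputparsinghelper-0.2021.2.17.1.tar.gz/jk_cmdoutputparsinghelper-0.2021.2.17.1/jk_cmdoutputparsinghelper/_LineUtils.py | getPositionsOfWords
-- ===== SOURCE A (Python) =====
-- def getPositionsOfWords(line:str) -> list:
-- 	ret = []
-- 	bLastWasSpace = True
-- 	for i, c in enumerate(line):
-- 		if c.isspace():
-- 			bLastWasSpace = True
-- 		else:
-- 			if bLastWasSpace:
-- 				ret.append(i)
-- 			bLastWasSpace = False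
-- 	return ret
-- ===== SOURCE B (Python) =====
-- from itertools import groupby
--
-- def getPositionsOfWords(line: str) -> list:
--     ret = []
--     offset = 0
--     for is_space, group in groupby(line, key=str.isspace):
--         n = sum(1 for _ in group)
--         if not is_space:
--             ret.append(offset)
--         offset += n
--     return ret
-- ===== Notes on version B (the rewrite author's own statement) =====
-- stated objective: alternative
-- what changed: B replaces A's per-character scan with a boolean flag by an itertools.groupby pass over maximal same-category runs, recording the running offset at each non-space run.
import Mathlib
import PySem

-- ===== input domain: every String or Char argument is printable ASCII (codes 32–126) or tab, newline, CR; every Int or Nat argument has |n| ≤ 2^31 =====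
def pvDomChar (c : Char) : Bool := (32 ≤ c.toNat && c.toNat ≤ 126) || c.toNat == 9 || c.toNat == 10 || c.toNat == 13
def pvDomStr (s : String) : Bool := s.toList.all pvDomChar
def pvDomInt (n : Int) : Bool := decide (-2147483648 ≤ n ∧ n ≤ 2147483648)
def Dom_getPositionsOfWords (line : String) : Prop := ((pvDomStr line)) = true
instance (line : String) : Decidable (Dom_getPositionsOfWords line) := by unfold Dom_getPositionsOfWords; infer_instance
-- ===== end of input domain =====

-- B replaces A's per-character scan with a boolean flag by a pass over maximal
-- same-category character runs (itertools.groupby), recording the running offset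
-- at each non-space run; same O(n) cost, different decomposition.


-- ===== PORT A =====
-- literal port of A: fold over enumerate(line) carrying (ret, bLastWasSpace)
def getPositionsOfWords (line : String) : List Int :=
  ((PySem.List.enumerate line.toList).foldl
    (fun (st : List Int × Bool) (p : Int × Char) =>
      if PySem.Chars.isspace p.2 then (st.1, true)
      else ((if st.2 then st.1 ++ [p.1] else st.1), false))
    ([], true)).1

-- ===== PORT B =====
-- groupby loop of Source B: consume one maximal run of same-isspace-category
-- characters per step, keeping the running offset
def pvAltLoop : List Char → Int → List Int
  | [], _ => []
  | c :: cs, off =>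
    let k := PySem.Chars.isspace c
    let run := cs.takeWhile (fun d => PySem.Chars.isspace d == k)
    (if k then ([] : List Int) else [off]) ++
      pvAltLoop (cs.drop run.length) (off + ((run.length : Int) + 1))
termination_by l _ => l.length
decreasing_by simp

def getPositionsOfWords_alt (line : String) : List Int := pvAltLoop line.toList 0

-- ===== PRECONDITION & SPEC =====
def Spec_getPositionsOfWords (line : String) (out : List Int) : Prop := out = getPositionsOfWords_alt line
instance (line : String) (out : List Int) : Decidable (Spec_getPositionsOfWords line out) := by unfold Spec_getPositionsOfWords; infer_instance

-- ===== CLAIM (what is proved, stated in full; the proofs are below) =====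
def Claim_equal_getPositionsOfWords : Prop := ∀ (line : String), Dom_getPositionsOfWords line → Spec_getPositionsOfWords line (getPositionsOfWords line)

-- ===== LEMMAS AND PROOFS =====

-- recursive characterisation of A's fold: remaining chars, current index, current flag
def pvALoop : List Char → Int → Bool → List Int
  | [], _, _ => []
  | c :: cs, i, b =>
    if PySem.Chars.isspace c then pvALoop cs (i + 1) true
    else (if b then [i] else []) ++ pvALoop cs (i + 1) false

theorem pvALoop_foldl (cs : List Char) : ∀ (i : Int) (acc : List Int) (b : Bool),
    ((PySem.List.enumerate cs i).foldl
      (fun (st : List Int × Bool) (p : Int × Char) =>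
        if PySem.Chars.isspace p.2 then (st.1, true)
        else ((if st.2 then st.1 ++ [p.1] else st.1), false))
      (acc, b)).1 = acc ++ pvALoop cs i b := by
  induction cs with
  | nil => intro i acc b; simp [PySem.List.enumerate_nil, pvALoop]
  | cons c cs ih =>
    intro i acc b
    rw [PySem.List.enumerate_cons]
    by_cases h : PySem.Chars.isspace c <;> by_cases hb : b <;>
      simp [List.foldl_cons, h, hb, ih, pvALoop]

theorem pvALoop_skip_nonspace (run : List Char) : ∀ (rest : List Char) (i : Int),
    (∀ c ∈ run, PySem.Chars.isspace c = false) →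
    pvALoop (run ++ rest) i false = pvALoop rest (i + run.length) false := by
  induction run with
  | nil => intro rest i _; simp
  | cons c cs ih =>
    intro rest i h
    have hc := h c (by simp)
    rw [List.cons_append, pvALoop, if_neg (by simp [hc]), ih rest (i + 1) (fun d hd => h d (by simp [hd]))]
    simp; ring_nf

theorem pvALoop_skip_space (run : List Char) : ∀ (rest : List Char) (i : Int),
    (∀ c ∈ run, PySem.Chars.isspace c = true) →
    pvALoop (run ++ rest) i true = pvALoop rest (i + run.length) true := by
  induction run with
  | nil => intro rest i _; simp
  | cons c cs ih =>
    intro rest i h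
    have hc := h c (by simp)
    rw [List.cons_append, pvALoop, if_pos (by simp [hc]), ih rest (i + 1) (fun d hd => h d (by simp [hd]))]
    simp; ring_nf

theorem pvAltLoop_nil (i : Int) : pvAltLoop [] i = [] := by
  rw [pvAltLoop.eq_def]

theorem pvAltLoop_cons (c : Char) (cs : List Char) (off : Int) :
    pvAltLoop (c :: cs) off =
      (if PySem.Chars.isspace c then ([] : List Int) else [off]) ++
        pvAltLoop (cs.drop (cs.takeWhile (fun d => PySem.Chars.isspace d == PySem.Chars.isspace c)).length)
          (off + (((cs.takeWhile (fun d => PySem.Chars.isspace d == PySem.Chars.isspace c)).length : Int) + 1)) := by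
  rw [pvAltLoop.eq_def]

theorem pvDrop_takeWhile (p : Char → Bool) (l : List Char) :
    l.drop (l.takeWhile p).length = l.dropWhile p := by
  induction l with
  | nil => simp
  | cons c cs ih => by_cases h : p c <;> simp [h, ih]

-- head-condition: flag true, or the list is empty / starts with a space
def pvOk (l : List Char) (b : Bool) : Prop :=
  b = true ∨ (match l with | [] => True | c :: _ => PySem.Chars.isspace c = true)

theorem pvALoop_eq_altLoop (n : Nat) : ∀ (l : List Char), l.length ≤ n → ∀ (i : Int) (b : Bool),
    pvOk l b → pvALoop l i b = pvAltLoop l i := by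
  induction n with
  | zero =>
    intro l hl i b _
    have : l = [] := List.eq_nil_of_length_eq_zero (Nat.le_zero.mp hl)
    subst this; simp [pvALoop, pvAltLoop_nil]
  | succ n ih =>
    intro l hl i b hok
    match l with
    | [] => simp [pvALoop, pvAltLoop_nil]
    | c :: cs =>
      rw [pvAltLoop_cons]
      by_cases h : PySem.Chars.isspace c
      · -- space run: the whole takeWhile run consists of spaces
        set run := cs.takeWhile (fun d => PySem.Chars.isspace d == PySem.Chars.isspace c) with hrun
        have hcs : run ++ cs.dropWhile (fun d => PySem.Chars.isspace d == PySem.Chars.isspace c) = cs :=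
          List.takeWhile_append_dropWhile
        have hallsp : ∀ d ∈ run, PySem.Chars.isspace d = true := by
          intro d hd
          have := List.mem_takeWhile_imp hd
          simpa [h] using this
        rw [pvALoop, if_pos h]
        rw [pvDrop_takeWhile]
        conv_lhs => rw [← hcs]
        rw [pvALoop_skip_space run _ _ hallsp]
        have hrest : pvOk (cs.dropWhile (fun d => PySem.Chars.isspace d == PySem.Chars.isspace c)) true := Or.inl rfl
        have hlen : (cs.dropWhile (fun d => PySem.Chars.isspace d == PySem.Chars.isspace c)).length ≤ n := by
          have := List.length_dropWhile_le (p := fun d => PySem.Chars.isspace d == PySem.Chars.isspace c) (l := cs)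
          simp at hl; omega
        rw [ih _ hlen _ true hrest]
        simp [h]; ring_nf
      · -- non-space run: flag must be true, emit i, skip the run
        have hb : b = true := by
          rcases hok with hb | hh
          · exact hb
          · simp at hh; simp [hh] at h
        subst hb
        set run := cs.takeWhile (fun d => PySem.Chars.isspace d == PySem.Chars.isspace c) with hrun
        have hcs : run ++ cs.dropWhile (fun d => PySem.Chars.isspace d == PySem.Chars.isspace c) = cs :=
          List.takeWhile_append_dropWhile
        have hallns : ∀ d ∈ run, PySem.Chars.isspace d = false := by
          intro d hd
          have := List.mem_takeWhile_imp hd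
          simpa [Bool.eq_false_iff.mpr h] using this
        rw [pvALoop, if_neg h, if_pos rfl]
        rw [pvDrop_takeWhile]
        conv_lhs => rw [← hcs]
        rw [pvALoop_skip_nonspace run _ _ hallns]
        have hrest : pvOk (cs.dropWhile (fun d => PySem.Chars.isspace d == PySem.Chars.isspace c)) false := by
          unfold pvOk
          cases hdw : cs.dropWhile (fun d => PySem.Chars.isspace d == PySem.Chars.isspace c) with
          | nil => exact Or.inr trivial
          | cons d ds =>
            right
            have hpred : (fun d => PySem.Chars.isspace d == PySem.Chars.isspace c) = (fun d => !PySem.Chars.isspace d) := by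
              funext e; simp [Bool.eq_false_iff.mpr h]
            rw [hpred] at hdw
            have := List.head_dropWhile_not (p := fun d => !PySem.Chars.isspace d) (l := cs) (by simp [hdw])
            simpa [hdw] using this
        have hlen : (cs.dropWhile (fun d => PySem.Chars.isspace d == PySem.Chars.isspace c)).length ≤ n := by
          have := List.length_dropWhile_le (p := fun d => PySem.Chars.isspace d == PySem.Chars.isspace c) (l := cs)
          simp at hl; omega
        rw [ih _ hlen _ false hrest]
        simp [Bool.eq_false_iff.mpr h]; ring_nf

-- ===== VERDICT (by name: the statement is the Claim_ definition above) =====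
theorem getPositionsOfWords_spec : Claim_equal_getPositionsOfWords := by
  intro line _
  unfold Spec_getPositionsOfWords getPositionsOfWords getPositionsOfWords_alt
  rw [pvALoop_foldl line.toList 0 [] true, List.nil_append]
  exact pvALoop_eq_altLoop line.toList.length line.toList le_rfl 0 true (Or.inl rfl)
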